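-- pv_equiv track=rewrite | github.com/polio-nanopore/piranha | piranha/report/make_report.py | assign_bcode_to_well
-- ===== SOURCE A (Python) =====
-- def well_to_dict(barcode_well_map,j,i,c):
--     if i<10:
--         well = f"{j}0{i}"
--
--     else:
--         well = f"{j}{i}"
--
--     if c<10:
--         barcode_well_map[well] = f"barcode0{c}"
--     else:
--         barcode_well_map[well] = f"barcode{c}"
--
-- def assign_bcode_to_well(orientation):
--     barcode_well_map = {}
--     c = 0
--     if orientation == "vertical":
--         for i in range(1,13):
--             for j in ["A","B","C","D","E","F","G","H"]:
--                 c +=1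
--                 well_to_dict(barcode_well_map,j,i,c)
--
--     elif orientation == "horizontal":
--         for j in ["A","B","C","D","E","F","G","H"]:
--             for i in range(1,13):
--                 c +=1
--                 well_to_dict(barcode_well_map,j,i,c)
--
--
--     return barcode_well_map
-- ===== SOURCE B (Python) =====
-- def assign_bcode_to_well(orientation):
--     rows = "ABCDEFGH"
--     barcode_well_map = {}
--     if orientation == "vertical":
--         for c in range(1, 97):
--             barcode_well_map[f"{rows[(c-1)%8]}{(c-1)//8+1:02d}"] = f"barcode{c:02d}"
--     elif orientation == "horizontal":
--         for c in range(1, 97):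
--             barcode_well_map[f"{rows[(c-1)//12]}{(c-1)%12+1:02d}"] = f"barcode{c:02d}"
--     return barcode_well_map
-- ===== Notes on version B (the rewrite author's own statement) =====
-- stated objective: simpler
-- what changed: Replaces the nested row/column loops threading a mutable counter through a helper with a single pass over barcode index c in range(1,97), deriving the well row/column from c by closed-form div/mod arithmetic and building both strings with zero-padded formatting.
import Mathlib
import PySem

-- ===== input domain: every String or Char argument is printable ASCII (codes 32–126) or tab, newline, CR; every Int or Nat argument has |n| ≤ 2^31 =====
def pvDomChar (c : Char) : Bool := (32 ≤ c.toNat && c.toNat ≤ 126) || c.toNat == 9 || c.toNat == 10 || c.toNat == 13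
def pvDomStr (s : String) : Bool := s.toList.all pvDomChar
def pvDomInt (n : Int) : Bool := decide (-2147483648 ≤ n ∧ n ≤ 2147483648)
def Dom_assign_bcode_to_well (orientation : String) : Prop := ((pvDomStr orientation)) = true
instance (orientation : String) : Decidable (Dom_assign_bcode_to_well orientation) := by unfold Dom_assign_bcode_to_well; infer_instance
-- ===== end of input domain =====

-- B replaces the counter-threaded nested loops with one closed-form pass over the
-- barcode index (objective: simpler).

-- ===== PORT A =====
-- port of well_to_dict: returns the updated dict (Python mutates it in place)
def well_to_dict (barcode_well_map : PySem.Dict String String) (j : String) (i c : Int) :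
    PySem.Dict String String :=
  let well := if i < 10 then j ++ "0" ++ PySem.Int.toStr i else j ++ PySem.Int.toStr i
  if c < 10 then barcode_well_map.insert well ("barcode0" ++ PySem.Int.toStr c)
  else barcode_well_map.insert well ("barcode" ++ PySem.Int.toStr c)

def assign_bcode_to_well (orientation : String) : List (String × String) :=
  let init : PySem.Dict String String × Int := (PySem.Dict.empty, 0)
  let st :=
    if orientation = "vertical" then
      (PySem.List.pyRange 1 13 1).foldl (fun st i =>
        (["A","B","C","D","E","F","G","H"]).foldl (fun st j =>
          let c := st.2 + 1
          (well_to_dict st.1 j i c, c)) st) init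
    else if orientation = "horizontal" then
      (["A","B","C","D","E","F","G","H"]).foldl (fun st j =>
        (PySem.List.pyRange 1 13 1).foldl (fun st i =>
          let c := st.2 + 1
          (well_to_dict st.1 j i c, c)) st) init
    else init
  st.1.items

-- ===== PORT B =====
-- port of f"{n:02d}" for 0 ≤ n < 100
def pad2 (n : Int) : String :=
  if n < 10 then "0" ++ PySem.Int.toStr n else PySem.Int.toStr n

def assign_bcode_to_well_alt (orientation : String) : List (String × String) :=
  let rows := "ABCDEFGH"
  if orientation = "vertical" then
    (PySem.List.pyRange 1 97 1).foldl (fun d c =>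
      d.insert ((((PySem.Str.pyGet? rows (PySem.Int.mod (c-1) 8)).map String.singleton).getD "") ++
                  pad2 (PySem.Int.floordiv (c-1) 8 + 1))
               ("barcode" ++ pad2 c)) PySem.Dict.empty |>.items
  else if orientation = "horizontal" then
    (PySem.List.pyRange 1 97 1).foldl (fun d c =>
      d.insert ((((PySem.Str.pyGet? rows (PySem.Int.floordiv (c-1) 12)).map String.singleton).getD "") ++
                  pad2 (PySem.Int.mod (c-1) 12 + 1))
               ("barcode" ++ pad2 c)) PySem.Dict.empty |>.items
  else (PySem.Dict.empty : PySem.Dict String String).items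

-- ===== PRECONDITION & SPEC =====
def Spec_assign_bcode_to_well (orientation : String) (out : List (String × String)) : Prop := out = assign_bcode_to_well_alt orientation
instance (orientation : String) (out : List (String × String)) : Decidable (Spec_assign_bcode_to_well orientation out) := by unfold Spec_assign_bcode_to_well; infer_instance

-- ===== CLAIM (what is proved, stated in full; the proofs are below) =====
def Claim_equal_assign_bcode_to_well : Prop := ∀ (orientation : String), Dom_assign_bcode_to_well orientation → Spec_assign_bcode_to_well orientation (assign_bcode_to_well orientation)

-- ===== LEMMAS AND PROOFS =====
set_option maxRecDepth 10000
theorem vertical_case : assign_bcode_to_well "vertical" = assign_bcode_to_well_alt "vertical" := by decide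

theorem horizontal_case : assign_bcode_to_well "horizontal" = assign_bcode_to_well_alt "horizontal" := by decide

theorem other_case (orientation : String) (h1 : orientation ≠ "vertical")
    (h2 : orientation ≠ "horizontal") :
    assign_bcode_to_well orientation = assign_bcode_to_well_alt orientation := by
  simp [assign_bcode_to_well, assign_bcode_to_well_alt, h1, h2, PySem.Dict.empty]

-- ===== VERDICT (by name: the statement is the Claim_ definition above) =====
theorem assign_bcode_to_well_spec : Claim_equal_assign_bcode_to_well := by
  intro orientation _
  unfold Spec_assign_bcode_to_well
  by_cases h1 : orientation = "vertical"
  · subst h1; exact vertical_case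
  · by_cases h2 : orientation = "horizontal"
    · subst h2; exact horizontal_case
    · exact other_case orientation h1 h2
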